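-- pv_equiv track=rewrite | github.com/AntonAks/palgo | Tasks/longest_subarray.py | longest_subarray_2
-- ===== SOURCE A (Python) =====
-- def longest_subarray_2(nums):
--
--     left = maxt = 0
--
--     count = 1
--     for right in range(len(nums)):
--         if nums[right] == 0:
--             count -= 1
--         while count < 0:
--             if nums[left] == 0:
--                 count += 1
--             left += 1
--
--         maxt = max(maxt, right - left)
--
--     return maxt
-- ===== SOURCE B (Python) =====
-- def longest_subarray_2(nums):
--     last = prev = -1
--     maxt = 0
--     for i, x in enumerate(nums):
--         if x == 0:
--             prev, last = last, i
--         maxt = max(maxt, i - prev - 1)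
--     return maxt
-- ===== Notes on version B (the rewrite author's own statement) =====
-- stated objective: simpler
-- what changed: Replaces the sliding window with its inner left-pointer shrink loop by a single pass that records the index of the last zero and the zero before it and takes max(maxt, i - prev_zero - 1) at each step.
import Mathlib
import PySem

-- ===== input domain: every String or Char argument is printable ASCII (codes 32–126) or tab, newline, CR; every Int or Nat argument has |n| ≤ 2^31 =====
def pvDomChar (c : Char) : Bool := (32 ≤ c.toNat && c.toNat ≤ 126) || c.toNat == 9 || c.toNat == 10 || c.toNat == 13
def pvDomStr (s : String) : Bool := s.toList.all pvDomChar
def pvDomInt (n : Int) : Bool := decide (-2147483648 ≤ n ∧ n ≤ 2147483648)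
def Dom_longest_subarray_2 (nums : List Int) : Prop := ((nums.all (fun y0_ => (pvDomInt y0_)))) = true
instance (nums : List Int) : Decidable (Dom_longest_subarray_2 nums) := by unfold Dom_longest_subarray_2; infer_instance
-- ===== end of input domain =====

-- B replaces A's sliding window (with inner left-pointer shrink loop) by a single pass
-- tracking the last two zero indices; objective: simpler (no inner loop, shorter code).


-- ===== PORT A =====
-- the 'while count < 0' loop, fueled (fuel = nums.length always suffices: the loop
-- advances left at most to the zero inside the window); nums[left]/nums[right] are
-- always in range in reachable states, so pyGetD is exact there
def shrinkA (nums : List Int) : Nat → Int → Int → Int × Int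
  | 0, left, count => (left, count)
  | f + 1, left, count =>
    if count < 0 then
      shrinkA nums f (left + 1)
        (if PySem.List.pyGetD nums left 0 = 0 then count + 1 else count)
    else (left, count)

def stepA (nums : List Int) (st : Int × Int × Int) (right : Int) : Int × Int × Int :=
  let count := if PySem.List.pyGetD nums right 0 = 0 then st.2.2 - 1 else st.2.2
  let lc := shrinkA nums nums.length st.1 count
  (lc.1, max st.2.1 (right - lc.1), lc.2)

def longest_subarray_2 (nums : List Int) : Int :=
  ((PySem.List.pyRange 0 (nums.length : Int) 1).foldl (stepA nums) (0, 0, 1)).2.1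

-- ===== PORT B =====
-- state = (last, prev, maxt): indices of the last zero and the zero before it (-1 if none)
def stepB (st : Int × Int × Int) (p : Int × Int) : Int × Int × Int :=
  let lp : Int × Int := if p.2 = 0 then (p.1, st.1) else (st.1, st.2.1)
  (lp.1, lp.2, max st.2.2 (p.1 - lp.2 - 1))

def longest_subarray_2_alt (nums : List Int) : Int :=
  ((PySem.List.enumerate nums 0).foldl stepB (-1, -1, 0)).2.2

-- ===== PRECONDITION & SPEC =====
def Spec_longest_subarray_2 (nums : List Int) (out : Int) : Prop := out = longest_subarray_2_alt nums
instance (nums : List Int) (out : Int) : Decidable (Spec_longest_subarray_2 nums out) := by unfold Spec_longest_subarray_2; infer_instance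

-- ===== CLAIM (what is proved, stated in full; the proofs are below) =====
def Claim_equal_longest_subarray_2 : Prop := ∀ (nums : List Int), Dom_longest_subarray_2 nums → Spec_longest_subarray_2 nums (longest_subarray_2 nums)

-- ===== LEMMAS AND PROOFS =====

-- invariant between A's state a = (left, maxt, count) and B's state b = (last, prev, maxt)
-- after processing indices [0, k)
def InvLS (nums : List Int) (k : Int) (a b : Int × Int × Int) : Prop :=
  a.1 = b.2.1 + 1 ∧ a.2.1 = b.2.2 ∧ a.2.2 = (if b.1 = -1 then 1 else 0) ∧
  ((b.1 = -1 ∧ b.2.1 = -1) ∨ (-1 ≤ b.2.1 ∧ b.2.1 < b.1 ∧ b.1 < k)) ∧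
  (b.1 ≠ -1 → PySem.List.pyGetD nums b.1 0 = 0) ∧
  (∀ j : Int, b.2.1 < j → j < k → j ≠ b.1 → PySem.List.pyGetD nums j 0 ≠ 0)

lemma shrink_nonneg (nums : List Int) (f : Nat) (l c : Int) (h : 0 ≤ c) :
    shrinkA nums f l c = (l, c) := by
  cases f with
  | zero => rfl
  | succ f => simp [shrinkA, not_lt.2 h]

lemma shrink_reach (nums : List Int) (la : Int) (h0 : PySem.List.pyGetD nums la 0 = 0) :
    ∀ (f : Nat) (l : Int), l ≤ la → la + 1 - l ≤ (f : Int) →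
      (∀ j : Int, l ≤ j → j < la → PySem.List.pyGetD nums j 0 ≠ 0) →
      shrinkA nums f l (-1) = (la + 1, 0) := by
  intro f
  induction f with
  | zero => intro l h1 h2 _; exfalso; omega
  | succ f ih =>
    intro l h1 h2 hnz
    by_cases hl : l = la
    · subst hl
      simp only [shrinkA, if_pos (by norm_num : (-1 : Int) < 0), h0]
      norm_num [shrink_nonneg]
    · have hlt : l < la := lt_of_le_of_ne h1 hl
      have hnz0 : PySem.List.pyGetD nums l 0 ≠ 0 := hnz l le_rfl hlt
      simp only [shrinkA, if_pos (by norm_num : (-1 : Int) < 0), if_neg hnz0]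
      exact ih (l + 1) (by omega) (by push_cast at h2 ⊢; omega)
        (fun j hj1 hj2 => hnz j (by omega) hj2)

lemma invLS_step (nums : List Int) (k : Nat) (hk : (k : Int) < (nums.length : Int))
    (a b : Int × Int × Int) (h : InvLS nums k a b) :
    InvLS nums ((k : Int) + 1) (stepA nums a (k : Int))
      (stepB b ((k : Int), PySem.List.pyGetD nums (k : Int) 0)) := by
  obtain ⟨h1, h2, h3, h4, h5, h6⟩ := h
  obtain ⟨l, m, c⟩ := a
  obtain ⟨la, p, mb⟩ := b
  simp only at h1 h2 h3 h5 h6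
  have hk0 : (0 : Int) ≤ (k : Int) := Int.natCast_nonneg k
  by_cases hz : PySem.List.pyGetD nums (k : Int) 0 = 0
  · by_cases hla : la = -1
    · -- first zero seen
      have hp : p = -1 := by rcases h4 with ⟨_, hp⟩ | ⟨_, h4b, _⟩ <;> omega
      have hc : c = 1 := by rw [h3, if_pos hla]
      have hsh : shrinkA nums nums.length l (1 - 1) = (l, 1 - 1) :=
        shrink_nonneg nums nums.length l (1 - 1) (by norm_num)
      have ea : stepA nums (l, m, c) (k : Int) = (l, max m ((k : Int) - l), 1 - 1) := by
        simp only [stepA, hc, if_pos hz, hsh]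
      have eb : stepB (la, p, mb) ((k : Int), PySem.List.pyGetD nums (k : Int) 0)
          = ((k : Int), la, max mb ((k : Int) - la - 1)) := by
        simp only [stepB, if_pos hz]
      rw [ea, eb]
      unfold InvLS
      refine ⟨by dsimp only; omega, by dsimp only; omega,
        by dsimp only; rw [if_neg (by omega : ¬ (k : Int) = -1)]; norm_num,
        Or.inr (by dsimp only; omega), fun _ => hz, ?_⟩
      intro j hj1 hj2 hj3
      dsimp only at hj1 hj2 hj3
      exact h6 j (by omega) (by omega) (by omega)
    · -- second (or later) zero: window shrinks past la
      have hc : c = 0 := by rw [h3, if_neg hla]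
      have h4' : -1 ≤ p ∧ p < la ∧ la < (k : Int) := by
        rcases h4 with ⟨hla', _⟩ | hh
        · exact absurd hla' hla
        · exact hh
      have hsh : shrinkA nums nums.length l (0 - 1) = (la + 1, 0) := by
        have e : (0 : Int) - 1 = -1 := by norm_num
        rw [e]
        exact shrink_reach nums la (h5 hla) nums.length l (by omega)
          (by omega)
          (fun j hj1 hj2 => h6 j (by omega) (by omega) (by omega))
      have ea : stepA nums (l, m, c) (k : Int)
          = (la + 1, max m ((k : Int) - (la + 1)), 0) := by
        simp only [stepA, hc, if_pos hz, hsh]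
      have eb : stepB (la, p, mb) ((k : Int), PySem.List.pyGetD nums (k : Int) 0)
          = ((k : Int), la, max mb ((k : Int) - la - 1)) := by
        simp only [stepB, if_pos hz]
      rw [ea, eb]
      unfold InvLS
      refine ⟨by dsimp only, by dsimp only; omega,
        by dsimp only; rw [if_neg (by omega : ¬ (k : Int) = -1)],
        Or.inr (by dsimp only; omega), fun _ => hz, ?_⟩
      intro j hj1 hj2 hj3
      dsimp only at hj1 hj2 hj3
      exact h6 j (by omega) (by omega) (by omega)
  · -- nonzero element: nothing shrinks
    have hcnn : (0 : Int) ≤ c := by rw [h3]; split <;> norm_num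
    have hsh : shrinkA nums nums.length l c = (l, c) :=
      shrink_nonneg nums nums.length l c hcnn
    have ea : stepA nums (l, m, c) (k : Int) = (l, max m ((k : Int) - l), c) := by
      simp only [stepA, if_neg hz, hsh]
    have eb : stepB (la, p, mb) ((k : Int), PySem.List.pyGetD nums (k : Int) 0)
        = (la, p, max mb ((k : Int) - p - 1)) := by
      simp only [stepB, if_neg hz]
    rw [ea, eb]
    unfold InvLS
    refine ⟨by dsimp only; omega, by dsimp only; omega, by dsimp only; exact h3, ?_, h5, ?_⟩
    · rcases h4 with ⟨ha, hb⟩ | hh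
      · exact Or.inl ⟨ha, hb⟩
      · exact Or.inr ⟨hh.1, hh.2.1, by omega⟩
    · intro j hj1 hj2 hj3
      dsimp only at hj1 hj2 hj3
      by_cases hjk : j = (k : Int)
      · subst hjk; exact hz
      · exact h6 j hj1 (by omega) hj3

lemma invLS_main (nums : List Int) :
    ∀ k : Nat, k ≤ nums.length →
      InvLS nums (k : Int)
        ((PySem.List.pyRange 0 (k : Int) 1).foldl (stepA nums) (0, 0, 1))
        ((PySem.List.pyRange 0 (k : Int) 1).foldl
          (fun st j => stepB st (j, PySem.List.pyGetD nums j 0)) (-1, -1, 0)) := by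
  intro k
  induction k with
  | zero =>
    intro _
    have e : PySem.List.pyRange 0 ((0 : Nat) : Int) 1 = [] := by
      rw [Nat.cast_zero]; exact PySem.List.pyRange_one_eq_nil le_rfl
    rw [e, List.foldl_nil, List.foldl_nil]
    unfold InvLS
    refine ⟨by norm_num, rfl, by norm_num, Or.inl ⟨rfl, rfl⟩, by norm_num, ?_⟩
    intro j hj1 hj2 _
    dsimp only at hj1 hj2
    omega
  | succ k ih =>
    intro hk
    have hk' : k ≤ nums.length := Nat.le_of_succ_le hk
    have hsplit : PySem.List.pyRange 0 ((k : Int) + 1) 1 =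
        PySem.List.pyRange 0 (k : Int) 1 ++ [(k : Int)] :=
      PySem.List.pyRange_one_succ_right (Int.natCast_nonneg k)
    have hcast : ((k + 1 : Nat) : Int) = (k : Int) + 1 := by push_cast; ring
    rw [hcast, hsplit, List.foldl_append, List.foldl_append]
    simp only [List.foldl_cons, List.foldl_nil]
    exact invLS_step nums k (by exact_mod_cast hk) _ _ (ih hk')

-- ===== VERDICT (by name: the statement is the Claim_ definition above) =====
theorem longest_subarray_2_spec : Claim_equal_longest_subarray_2 := by
  intro nums _
  unfold Spec_longest_subarray_2 longest_subarray_2 longest_subarray_2_alt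
  rw [PySem.List.enumerate_eq_map_pyRange nums 0, List.foldl_map]
  have h := invLS_main nums nums.length le_rfl
  obtain ⟨-, h2, -⟩ := h
  simpa using h2
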